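-- pv_equiv track=rewrite | github.com/mischegoss/qloo | backend/config/cultural_mappings.py | get_formative_decades
-- ===== SOURCE A (Python) =====
-- from typing import Dict, Any, List
--
-- def get_formative_decades(birth_year: int) -> List[int]:
--     """
--     Get the decades that were formative for someone (teens/young adult years).
--
--     Args:
--         birth_year: Year of birth
--
--     Returns:
--         List of decade years when they were 15-35 (strongest memories)
--     """
--     try:
--         if not birth_year or birth_year < 1900:
--             return [1950, 1960, 1970]  # Safe default
--
--         formative_start = birth_year + 15  # Age 15
--         formative_end = birth_year + 35    # Age 35
--
--         decades = []
--         for decade_start in range(1920, 2030, 10):  # 1920, 1930, 1940, etc.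
--             if decade_start >= formative_start - 10 and decade_start <= formative_end:
--                 decades.append(decade_start)
--
--         return decades if decades else [1950, 1960, 1970]
--
--     except Exception:
--         return [1950, 1960, 1970]
-- ===== SOURCE B (Python) =====
-- from typing import List
--
-- def get_formative_decades(birth_year: int) -> List[int]:
--     """Closed-form window: decades d in [1920,2020] with birth_year+5 <= d <= birth_year+35."""
--     if not birth_year or birth_year < 1900:
--         return [1950, 1960, 1970]
--     start = max(1920, ((birth_year + 14) // 10) * 10)   # smallest decade >= birth_year + 5
--     end = min(2020, ((birth_year + 35) // 10) * 10)     # largest decade <= birth_year + 35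
--     decades = list(range(start, end + 10, 10))
--     return decades if decades else [1950, 1960, 1970]
-- ===== Notes on version B (the rewrite author's own statement) =====
-- stated objective: simpler
-- what changed: Replaces A's fixed decade-by-decade scan with a membership test per decade by a closed-form arithmetic computation of the qualifying decade window (rounded start/end multiples of ten) returned as one range.
import Mathlib
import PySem

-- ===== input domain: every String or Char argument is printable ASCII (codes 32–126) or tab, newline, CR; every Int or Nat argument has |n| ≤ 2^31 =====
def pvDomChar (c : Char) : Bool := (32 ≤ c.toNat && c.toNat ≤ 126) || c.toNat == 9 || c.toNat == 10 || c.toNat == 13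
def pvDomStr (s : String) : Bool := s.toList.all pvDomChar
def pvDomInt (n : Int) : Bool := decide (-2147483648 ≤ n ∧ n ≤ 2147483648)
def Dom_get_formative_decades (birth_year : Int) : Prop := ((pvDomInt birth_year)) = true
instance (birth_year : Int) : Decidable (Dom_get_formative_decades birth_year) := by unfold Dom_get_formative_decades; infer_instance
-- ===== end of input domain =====

-- B replaces A's scan over range(1920,2030,10) by a closed-form decade window (simpler; same guards and default).

-- ===== PORT A =====
def get_formative_decades (birth_year : Int) : List Int :=
  if birth_year = 0 ∨ birth_year < 1900 then [1950, 1960, 1970]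
  else
    let formative_start := birth_year + 15
    let formative_end := birth_year + 35
    let decades := (PySem.List.pyRange 1920 2030 10).foldl
      (fun acc decade_start =>
        if decade_start ≥ formative_start - 10 ∧ decade_start ≤ formative_end then
          acc ++ [decade_start]
        else acc) []
    if decades = [] then [1950, 1960, 1970] else decades

-- ===== PORT B =====
def get_formative_decades_alt (birth_year : Int) : List Int :=
  if birth_year = 0 ∨ birth_year < 1900 then [1950, 1960, 1970]
  else
    let start := max 1920 (PySem.Int.floordiv (birth_year + 14) 10 * 10)
    let stop := min 2020 (PySem.Int.floordiv (birth_year + 35) 10 * 10)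
    let decades := PySem.List.pyRange start (stop + 10) 10
    if decades = [] then [1950, 1960, 1970] else decades

-- ===== PRECONDITION & SPEC =====
def Spec_get_formative_decades (birth_year : Int) (out : List Int) : Prop := out = get_formative_decades_alt birth_year
instance (birth_year : Int) (out : List Int) : Decidable (Spec_get_formative_decades birth_year out) := by unfold Spec_get_formative_decades; infer_instance

-- ===== CLAIM (what is proved, stated in full; the proofs are below) =====
def Claim_equal_get_formative_decades : Prop := ∀ (birth_year : Int), Dom_get_formative_decades birth_year → Spec_get_formative_decades birth_year (get_formative_decades birth_year)

-- ===== LEMMAS AND PROOFS =====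

-- A's loop collects nothing when the window misses every decade
theorem pv_foldl_none (y : Int) (l acc : List Int)
    (h : ∀ d ∈ l, ¬(d ≥ y + 15 - 10 ∧ d ≤ y + 35)) :
    l.foldl (fun acc d => if d ≥ y + 15 - 10 ∧ d ≤ y + 35 then acc ++ [d] else acc) acc = acc := by
  induction l generalizing acc with
  | nil => rfl
  | cons a t ih =>
    simp only [List.foldl_cons, if_neg (h a (List.mem_cons_self))]
    exact ih acc fun d hd => h d (List.mem_cons_of_mem a hd)

theorem pv_high (y : Int) (hy : 2016 ≤ y) :
    get_formative_decades y = get_formative_decades_alt y := by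
  have h0 : ¬(y = 0 ∨ y < 1900) := by omega
  have hR : PySem.List.pyRange 1920 2030 10 =
      [1920, 1930, 1940, 1950, 1960, 1970, 1980, 1990, 2000, 2010, 2020] := by decide
  have hA : get_formative_decades y = [1950, 1960, 1970] := by
    unfold get_formative_decades
    rw [if_neg h0]
    simp only [hR]
    rw [pv_foldl_none y _ [] (by intro d hd; fin_cases hd <;> omega)]
    rfl
  have hB : get_formative_decades_alt y = [1950, 1960, 1970] := by
    unfold get_formative_decades_alt
    rw [if_neg h0]
    have hfd1 : PySem.Int.floordiv (y + 14) 10 = (y + 14) / 10 :=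
      PySem.Int.floordiv_eq_ediv_of_pos (by norm_num)
    have hfd2 : PySem.Int.floordiv (y + 35) 10 = (y + 35) / 10 :=
      PySem.Int.floordiv_eq_ediv_of_pos (by norm_num)
    have hnil : PySem.List.pyRange (max 1920 (PySem.Int.floordiv (y + 14) 10 * 10))
        (min 2020 (PySem.Int.floordiv (y + 35) 10 * 10) + 10) 10 = [] := by
      rw [List.eq_nil_iff_forall_not_mem]
      intro x hx
      rw [PySem.List.mem_pyRange_iff_of_pos (by norm_num)] at hx
      rw [hfd1, hfd2] at hx
      omega
    simp only [hnil]
    rfl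
  rw [hA, hB]

-- ===== VERDICT (by name: the statement is the Claim_ definition above) =====
theorem get_formative_decades_spec : Claim_equal_get_formative_decades := by
  intro y _
  unfold Spec_get_formative_decades
  by_cases h0 : y = 0 ∨ y < 1900
  · unfold get_formative_decades get_formative_decades_alt
    rw [if_pos h0, if_pos h0]
  · by_cases h2 : y ≤ 2015
    · have h1 : 1900 ≤ y := by omega
      have h2' : y ≤ 2015 := h2
      interval_cases y <;> decide
    · exact pv_high y (by omega)
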